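-- pv_equiv track=rewrite | github.com/Ncarlson27/Analysis-of-Algorithms-Final | flow_matching.py | _row_duplicates
-- ===== SOURCE A (Python) =====
-- from typing import List, Tuple, Optional, Set
--
-- def _row_duplicates(vals: List[int]) -> int:
--     seen = set()
--     dup = 0
--     for v in vals:
--         if v == 0:
--             continue
--         if v in seen:
--             dup += 1
--         else:
--             seen.add(v)
--     return dup
-- ===== SOURCE B (Python) =====
-- def _row_duplicates(vals):
--     nz = sorted(v for v in vals if v != 0)
--     return sum(1 for a, b in zip(nz, nz[1:]) if a == b)
-- ===== Notes on version B (the rewrite author's own statement) =====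
-- stated objective: alternative
-- what changed: B keeps no seen-set and no membership test at all: it sorts the nonzero values and counts adjacent equal pairs, which equals the number of duplicates since equal values become adjacent after sorting.
import Mathlib
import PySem

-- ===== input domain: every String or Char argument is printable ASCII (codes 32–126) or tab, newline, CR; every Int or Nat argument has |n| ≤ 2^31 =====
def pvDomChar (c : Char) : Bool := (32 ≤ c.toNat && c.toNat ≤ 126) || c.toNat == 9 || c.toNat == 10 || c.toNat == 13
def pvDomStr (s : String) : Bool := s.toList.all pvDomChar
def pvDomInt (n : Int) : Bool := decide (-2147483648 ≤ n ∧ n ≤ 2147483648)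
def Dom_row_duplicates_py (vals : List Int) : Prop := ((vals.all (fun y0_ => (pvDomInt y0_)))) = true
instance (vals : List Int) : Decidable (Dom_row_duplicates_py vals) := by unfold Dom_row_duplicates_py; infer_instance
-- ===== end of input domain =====

-- B drops A's seen-set and membership branch entirely: it sorts the nonzero values and
-- counts adjacent equal pairs (equal values become adjacent after sorting); same result.

-- ===== PORT A =====
-- literal transliteration of A: fold over vals carrying (seen, dup)
def row_duplicates_py (vals : List Int) : Int :=
  (vals.foldl (fun (st : PySem.Set Int × Int) v =>
      if v == 0 then st
      else if PySem.Set.contains st.1 v then (st.1, st.2 + 1)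
      else (PySem.Set.add st.1 v, st.2))
    (PySem.Set.empty, 0)).2

-- ===== PORT B =====
-- literal transliteration of Source B: nz = sorted(v for v in vals if v != 0);
-- sum(1 for a, b in zip(nz, nz[1:]) if a == b)   (nz[1:] = slice nz (some 1) none)
def row_duplicates_py_alt (vals : List Int) : Int :=
  let nz := PySem.List.sorted (vals.filter (fun v => decide (v ≠ 0))) (fun x => x) false
  (nz.zip (PySem.List.slice nz (some 1) none)).foldl
    (fun acc p => if p.1 == p.2 then acc + 1 else acc) 0

-- ===== PRECONDITION & SPEC =====
def Spec_row_duplicates_py (vals : List Int) (out : Int) : Prop := out = row_duplicates_py_alt vals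
instance (vals : List Int) (out : Int) : Decidable (Spec_row_duplicates_py vals out) := by unfold Spec_row_duplicates_py; infer_instance

-- ===== CLAIM (what is proved, stated in full; the proofs are below) =====
def Claim_equal_row_duplicates_py : Prop := ∀ (vals : List Int), Dom_row_duplicates_py vals → Spec_row_duplicates_py vals (row_duplicates_py vals)

-- ===== LEMMAS AND PROOFS =====

-- recursive form of B's adjacent-pair count
def adjEq : List Int → Int
  | a :: b :: t => (if a = b then 1 else 0) + adjEq (b :: t)
  | _ => 0

theorem adjEq_foldl : ∀ (l : List Int) (acc : Int),
    (l.zip l.tail).foldl (fun acc p => if p.1 == p.2 then acc + 1 else acc) acc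
      = acc + adjEq l := by
  intro l
  induction l with
  | nil => intro acc; simp [adjEq]
  | cons a t ih =>
    intro acc
    cases t with
    | nil => simp [adjEq]
    | cons b t' =>
      simp only [List.tail_cons, List.zip_cons_cons, List.foldl_cons]
      rw [show (b :: t').tail = t' from rfl] at ih
      rw [ih]
      by_cases h : a = b
      · simp [adjEq, h]; ring
      · simp [adjEq, h]

-- |set(l)| = |l.toFinset| (PySem.Set.ofList is nodup with the same membership)
theorem ofList_length_eq_card (l : List Int) :
    (PySem.Set.ofList l).length = l.toFinset.card := by
  have hnd : (PySem.Set.ofList l).Nodup := PySem.Set.nodup_ofList l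
  have hfs : (PySem.Set.ofList l).toFinset = l.toFinset := by
    ext x; simp [List.mem_toFinset, PySem.Set.mem_ofList]
  rw [← List.toFinset_card_of_nodup hnd, hfs]

-- on a ≤-sorted list, adjacent-equal pairs + distinct elements = length
theorem adjEq_sorted : ∀ (l : List Int), l.Pairwise (· ≤ ·) →
    adjEq l + (l.toFinset.card : Int) = (l.length : Int) := by
  intro l
  induction l with
  | nil => intro _; simp [adjEq]
  | cons a t ih =>
    intro hp
    cases t with
    | nil => simp [adjEq]
    | cons b t' =>
      have hp' : (b :: t').Pairwise (· ≤ ·) := hp.tail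
      have hab : a ≤ b := (List.pairwise_cons.mp hp).1 b (by simp)
      by_cases h : a = b
      · have hmem : a ∈ b :: t' := by rw [h]; exact List.mem_cons_self
        have : (a :: b :: t').toFinset = (b :: t').toFinset := by
          rw [List.toFinset_cons, Finset.insert_eq_self.mpr (List.mem_toFinset.mpr hmem)]
        rw [this]
        have := ih hp'
        simp only [adjEq, h, List.length_cons] at *
        push_cast
        omega
      · have hnmem : a ∉ b :: t' := by
          intro hm
          rcases List.mem_cons.mp hm with h1 | h2
          · exact h h1
          · have hbx : b ≤ a := (List.pairwise_cons.mp hp').1 a h2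
            exact h (le_antisymm hab hbx)
        have hcard : (a :: b :: t').toFinset.card = (b :: t').toFinset.card + 1 := by
          rw [List.toFinset_cons,
            Finset.card_insert_of_notMem (fun hc => hnmem (List.mem_toFinset.mp hc))]
        rw [show adjEq (a :: b :: t') = (if a = b then 1 else 0) + adjEq (b :: t') from rfl,
          if_neg h]
        have hih := ih hp'
        simp only [List.length_cons] at *
        rw [hcard]
        push_cast at *
        omega

-- A's loop invariant: dup + |seen ∪ nonzeros| = dup + #nonzeros + |seen|
theorem row_dup_loop_inv (vals : List Int) : ∀ (seen : PySem.Set Int) (dup : Int),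
    (vals.foldl (fun (st : PySem.Set Int × Int) v =>
        if v == 0 then st
        else if PySem.Set.contains st.1 v then (st.1, st.2 + 1)
        else (PySem.Set.add st.1 v, st.2)) (seen, dup)).2
      + (((vals.filter (fun v => decide (v ≠ 0))).foldl PySem.Set.add seen).length : Int)
    = dup + ((vals.filter (fun v => decide (v ≠ 0))).length : Int) + (seen.length : Int) := by
  induction vals with
  | nil => intro seen dup; simp [List.foldl, List.filter]
  | cons v rest ih =>
    intro seen dup
    by_cases hv : v = 0
    · subst hv; simpa using ih seen dup
    · have hfil : (v :: rest).filter (fun v => decide (v ≠ 0))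
          = v :: rest.filter (fun v => decide (v ≠ 0)) := by simp [hv]
      by_cases hmem : PySem.Set.contains seen v = true
      · have hadd : PySem.Set.add seen v = seen :=
          PySem.Set.add_of_mem ((PySem.Set.contains_iff seen v).mp hmem)
        simp only [hfil, List.foldl_cons]
        rw [if_neg (by simp [hv]), if_pos hmem, hadd, ih seen (dup + 1)]
        simp only [List.length_cons]
        push_cast; ring
      · have hadd : PySem.Set.add seen v = seen ++ [v] :=
          PySem.Set.add_of_not_mem (fun hm => hmem ((PySem.Set.contains_iff seen v).mpr hm))
        simp only [hfil, List.foldl_cons]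
        rw [if_neg (by simp [hv]), if_neg hmem, hadd, ih (seen ++ [v]) dup]
        simp only [List.length_cons, List.length_append, List.length_nil]
        push_cast; ring

-- ===== VERDICT (by name: the statement is the Claim_ definition above) =====
theorem row_duplicates_py_spec : Claim_equal_row_duplicates_py := by
  intro vals _
  unfold Spec_row_duplicates_py row_duplicates_py row_duplicates_py_alt
  set nz := vals.filter (fun v => decide (v ≠ 0)) with hnz
  set s := PySem.List.sorted nz (fun x => x) false with hs
  -- A's side: result = |nz| - |set(nz)|
  have hA := row_dup_loop_inv vals PySem.Set.empty 0
  simp only [show (PySem.Set.empty : PySem.Set Int) = [] from rfl] at hA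
  rw [← PySem.Set.ofList_eq_foldl, ← hnz] at hA
  simp only [List.length_nil, Nat.cast_zero, add_zero, zero_add] at hA
  -- B's side
  show _ = (s.zip (PySem.List.slice s (some 1) none)).foldl
      (fun acc p => if p.1 == p.2 then acc + 1 else acc) 0
  rw [PySem.List.slice_from_one, adjEq_foldl]
  have hperm : s.Perm nz := PySem.List.sorted_perm nz (fun x => x) false
  have hsorted : s.Pairwise (· ≤ ·) := PySem.List.sorted_pairwise nz (fun x => x)
  have hB := adjEq_sorted s hsorted
  have hfs : s.toFinset = nz.toFinset := by
    ext x; simp only [List.mem_toFinset]; exact hperm.mem_iff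
  rw [hfs, hperm.length_eq] at hB
  rw [ofList_length_eq_card] at hA
  simp only [show (PySem.Set.empty : PySem.Set Int) = [] from rfl]
  omega
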